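/-
  THE PROOF BEHIND THE HEADLINE (Prog/Jsmn/Statement.lean): the runs of jsmn_d.bin / jsmn_s.bin from the interpreter's literal ring-0 start machine
  to a processor that HAS HALTED AND STAYS HALTED with jsmn_main's output at 400000H — with the PURE theorems about the model plugged in.

    Prog/Jsmn/StartInst.lean `outputs_of_model`   the run outputs `encodeResult cfg r ts'` for whatever the model (`Jsmn.parseFuel` from `Parser.init`
                                                  on `N` zero tokens) answers — given `MainSpec b (User.startLayout 0 _)`, the contract of jsmn_main on the ring-0 start layout
    jsmn_main_from_start_D / _S                   that, for the two programs `jsmnProgramD` (num_tokens = ND) / `jsmnProgramS` (NS)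
    (a) ON VALID JSON   Json/Jsmn/CorrectMain.lean (`run_default_valid`, `run_strictLinks_valid`, `encodeResult_valid`): for a well-formed layout `l`
                        (Json/Grammar.lean: the parse tree with its whitespace) between whitespace `w1`, `w2`, the model answers `l.count` and the
                        expected tokens `l.tokens w1.length 0 (-1)` (Json/Jsmn/Expected.lean), so the output is the count, then exactly those tokens' bytes:
                          valid_outputs_D   default build
                          valid_outputs_S   -DJSMN_STRICT -DJSMN_PARENT_LINKS: PROVIDED a top-level number / true / false / null is followed by whitespace;
                          bare_primitive_outputs_S   otherwise that build answers JSMN_ERROR_PART (-3): the output is the four bytes FD FF FF FF — the known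
                                            conformance difference from RFC 8259 (a bare `42` is a valid JSON text; JSMN_STRICT rejects it)
    (b) ALWAYS HALTS    Json/Jsmn/Total.lean (`parse_total`, `parse_result`) + Json/Jsmn/Safe.lean (`safeFacts`): for EVERY byte string of at most
                        1FF000H bytes the model answers some `(r, ts')` with `0 ≤ r → r ≤ N`: `model_answers`; hence `always_outputs_D / _S`.
  `num_tokens` is a CONSTANT of each program: ND = 3F000H (16-byte tokens: the output ends at 7F0004H), NS = 32000H (20-byte tokens: 7E8004H) — round
  numbers close to what the layout allows below the stack (Prog/Jsmn/Start.lean `main_pre` needs 4 + sizeof(jsmntok_t) * N ≤ 3F8000H: the output ends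
  below 7F8000H; RSP = 800000H and jsmn_main with its callees uses 168 + 8 bytes of stack at most).
-/
import Prog.Jsmn.StartInst
import Json.Jsmn.CorrectMain
import Json.Jsmn.Total
import Json.Jsmn.Safe

namespace X86
namespace J6
namespace Runs
open X86.User (CodeAt RegsKept Span FlagsOK Layout toNat_add_ofNat toNat_ofNat_lt' add_ofNat_add)
open Jsmn Json Start

set_option maxRecDepth 100000
set_option linter.unusedVariables false

/-- `num_tokens` of the default build's program: 258,048 tokens of 16 bytes. -/
def ND : Nat := 0x3F000
/-- `num_tokens` of the strict + parent-links build's program: 204,800 tokens of 20 bytes. -/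
def NS : Nat := 0x32000

/-- jsmn_d.bin with its stub, on harness.py's layout: `jsmn_main(js = 200000H, len, out = 400000H, num_tokens = ND)`. -/
def jsmnProgramD : OnX86.Program := programOf binD ND
/-- jsmn_s.bin likewise, `num_tokens = NS`. -/
def jsmnProgramS : OnX86.Program := programOf binS NS

theorem fitsD : 4 + binD.cfg.tokSize * ND ≤ 0x3F8000 := by decide
theorem fitsS : 4 + binS.cfg.tokSize * NS ≤ 0x3F8000 := by decide

/-! ### From `Jsmn.run` (jsmn_init + one jsmn_parse, fuel = |js| + 1) to `parseFuel` -/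

theorem parse_of_run {cfg : Jsmn.Config} {js : List UInt8} {ts0 : Tokens} {n : Nat} {r : Int} {toks' : Option Tokens}
    (h : Jsmn.run cfg js (some ts0) n = some (r, toks')) :
    ∃ p', parseFuel cfg (js.length + 1) js Parser.init (some ts0) n = some (r, p', toks') := by
  unfold Jsmn.run parse at h
  cases hp : parseFuel cfg (js.length + 1) js Parser.init (some ts0) n with
  | none => rw [hp] at h; simp at h
  | some x =>
    obtain ⟨r1, p1, t1⟩ := x
    rw [hp] at h
    simp only [Option.map_some, Option.some.injEq, Prod.mk.injEq] at h
    obtain ⟨rfl, rfl⟩ := h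
    exact ⟨p1, rfl⟩

/-! ### (b) the model always answers -/

/-- **The model of jsmn_parse answers on every text of at most 1FF000H bytes**, from a fresh parser on `N ≤ 2^31` zero tokens: a result `r` and
tokens `ts'`, and a non-negative result is at most `N` (it is `toknext`, the number of tokens in use). -/
theorem model_answers (cfg : Jsmn.Config) (js : List UInt8) (N : Nat) (hlen : js.length ≤ 0x1FF000) (hN : N ≤ 2147483648) :
    ∃ (r : Int) (p' : Parser) (ts' : Tokens),
      parseFuel cfg (js.length + 1) js Parser.init (some (zeroToks N)) N = some (r, p', some ts') ∧ (0 ≤ r → r ≤ N) := by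
  have sf := safeFacts cfg
  have hinv : Inv cfg Parser.init (some (zeroToks N)) N :=
    sf.init _ _ ⟨by omega, fun ts h => by cases h; exact ⟨zeroToks_length N, hN⟩⟩
  obtain ⟨⟨r, p', toks'⟩, hp⟩ := parse_total cfg js Parser.init (some (zeroToks N)) N (by omega) hinv
  obtain ⟨hinv', hnull⟩ := sf.parse _ _ _ _ _ _ _ _ hinv hp
  have hres := (parse_result cfg js Parser.init (some (zeroToks N)) N (by omega) hinv (by show 0 + js.length < _; omega) hp).2
  cases toks' with
  | none => exact absurd (hnull.mp rfl) (by simp)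
  | some ts' =>
    refine ⟨r, p', ts', hp, fun h0 => ?_⟩
    have h1 := hres (by simp) h0
    have h2 := (hinv'.toks ts' rfl).toknext
    omega

section
variable (μ : Microarch) (hμ : MicroOK μ) (ub : Nat → Bool)
include hμ

/-- **jsmn_d.bin from the start machine**: the run halts with `encodeResult Config.default r ts'` at 400000H for WHATEVER the model answers
(any fuel that makes it answer) from a fresh parser on ND zero tokens (`outputs_of_model` for `binD`). -/
theorem jsmn_main_from_start_D (hmain : MainSpec binD (User.startLayout 0 (Or.inl rfl))) (js : List UInt8) (hlen : js.length ≤ 0x1FF000) {fuel : Nat} {r : Int} {p' : Parser}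
    {ts' : Tokens} (hmodel : parseFuel Config.default fuel js Parser.init (some (zeroToks ND)) ND = some (r, p', some ts'))
    (hr : 0 ≤ r → r ≤ ND) : OnX86.Outputs μ jsmnProgramD ub js (encodeResult Config.default r ts') :=
  outputs_of_model stubD hmain μ hμ ub js ND hlen fitsD hmodel hr

/-- **jsmn_s.bin from the start machine**, likewise (NS zero tokens of 20 bytes). -/
theorem jsmn_main_from_start_S (hmain : MainSpec binS (User.startLayout 0 (Or.inl rfl))) (js : List UInt8) (hlen : js.length ≤ 0x1FF000) {fuel : Nat} {r : Int} {p' : Parser}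
    {ts' : Tokens} (hmodel : parseFuel Config.strictLinks fuel js Parser.init (some (zeroToks NS)) NS = some (r, p', some ts'))
    (hr : 0 ≤ r → r ≤ NS) : OnX86.Outputs μ jsmnProgramS ub js (encodeResult Config.strictLinks r ts') :=
  outputs_of_model stubS hmain μ hμ ub js NS hlen fitsS hmodel hr

/-- **jsmn_d.bin halts on every input** of at most 1FF000H bytes, with the model's answer as its output. -/
theorem always_outputs_D (hmain : MainSpec binD (User.startLayout 0 (Or.inl rfl))) (s : List UInt8) (hlen : s.length ≤ 0x1FF000) :
    ∃ (r : Int) (p' : Parser) (ts' : Tokens),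
      parseFuel Config.default (s.length + 1) s Parser.init (some (zeroToks ND)) ND = some (r, p', some ts') ∧
      OnX86.Outputs μ jsmnProgramD ub s (encodeResult Config.default r ts') := by
  obtain ⟨r, p', ts', hp, hr⟩ := model_answers Config.default s ND hlen (by decide)
  exact ⟨r, p', ts', hp, outputs_of_model stubD hmain μ hμ ub s ND hlen fitsD hp hr⟩

/-- **jsmn_s.bin halts on every input** of at most 1FF000H bytes, with the model's answer as its output. -/
theorem always_outputs_S (hmain : MainSpec binS (User.startLayout 0 (Or.inl rfl))) (s : List UInt8) (hlen : s.length ≤ 0x1FF000) :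
    ∃ (r : Int) (p' : Parser) (ts' : Tokens),
      parseFuel Config.strictLinks (s.length + 1) s Parser.init (some (zeroToks NS)) NS = some (r, p', some ts') ∧
      OnX86.Outputs μ jsmnProgramS ub s (encodeResult Config.strictLinks r ts') := by
  obtain ⟨r, p', ts', hp, hr⟩ := model_answers Config.strictLinks s NS hlen (by decide)
  exact ⟨r, p', ts', hp, outputs_of_model stubS hmain μ hμ ub s NS hlen fitsS hp hr⟩

/-! ### (a) on valid JSON -/

/-- **jsmn_d.bin on a JSON text**: for a well-formed layout `l` between whitespace `w1`, `w2` that fits the harness (at most 1FF000H bytes, at most ND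
tokens), the output is the number of tokens, then exactly the expected tokens (16 bytes each). -/
theorem valid_outputs_D (hmain : MainSpec binD (User.startLayout 0 (Or.inl rfl))) (w1 : List UInt8) (l : Json.Layout) (w2 : List UInt8) (hw1 : IsWs w1) (hw2 : IsWs w2)
    (wf : l.WellFormed) (hlen : (w1 ++ l.text ++ w2).length ≤ 0x1FF000) (hcount : l.count ≤ ND) :
    OnX86.Outputs μ jsmnProgramD ub (w1 ++ l.text ++ w2)
      (le32 (l.count : Int) ++ (l.tokens w1.length 0 (-1)).flatMap (Token.bytes Config.default)) := by
  have h := run_default_valid w1 l w2 hw1 hw2 wf (by omega) ND (zeroToks ND) (zeroToks_length _) (by decide) hcount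
  obtain ⟨p', hp⟩ := parse_of_run h
  have ho := outputs_of_model stubD hmain μ hμ ub _ ND hlen fitsD hp (fun _ => by exact_mod_cast hcount)
  rwa [show binD.cfg = Config.default from rfl, encodeResult_valid Config.default l w1.length (zeroToks ND) (by rw [zeroToks_length]; exact hcount)]
    at ho

/-- **jsmn_s.bin on a JSON text**: the same (20 bytes per token: the parent links too), PROVIDED a top-level number / true / false / null is
followed by at least one whitespace character. -/
theorem valid_outputs_S (hmain : MainSpec binS (User.startLayout 0 (Or.inl rfl))) (w1 : List UInt8) (l : Json.Layout) (w2 : List UInt8) (hw1 : IsWs w1) (hw2 : IsWs w2)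
    (wf : l.WellFormed) (hprim : l.isPrimitive = true → w2 ≠ []) (hlen : (w1 ++ l.text ++ w2).length ≤ 0x1FF000) (hcount : l.count ≤ NS) :
    OnX86.Outputs μ jsmnProgramS ub (w1 ++ l.text ++ w2)
      (le32 (l.count : Int) ++ (l.tokens w1.length 0 (-1)).flatMap (Token.bytes Config.strictLinks)) := by
  have h := run_strictLinks_valid w1 l w2 hw1 hw2 wf hprim (by omega) NS (zeroToks NS) (zeroToks_length _) (by decide) hcount
  obtain ⟨p', hp⟩ := parse_of_run h
  have ho := outputs_of_model stubS hmain μ hμ ub _ NS hlen fitsS hp (fun _ => by exact_mod_cast hcount)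
  have he := encodeResult_valid Config.strictLinks l w1.length (zeroToks NS) (by rw [zeroToks_length]; exact hcount)
  rw [stamp_links rfl _ _ (by rw [Json.Layout.tokens_length, zeroToks_length]; exact hcount)] at he
  rwa [show binS.cfg = Config.strictLinks from rfl, he] at ho

/-- **jsmn_s.bin rejects a bare top-level primitive** (`42`, `true`, `null` … with nothing behind it — a valid JSON text by RFC 8259): the output is
the four bytes of JSMN_ERROR_PART = -3. -/
theorem bare_primitive_outputs_S (hmain : MainSpec binS (User.startLayout 0 (Or.inl rfl))) (w1 : List UInt8) (l : Json.Layout) (hw1 : IsWs w1) (wf : l.WellFormed)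
    (hp : l.isPrimitive = true) (hlen : (w1 ++ l.text).length ≤ 0x1FF000) :
    OnX86.Outputs μ jsmnProgramS ub (w1 ++ l.text) (le32 JSMN_ERROR_PART) := by
  have h := run_strictLinks_bare_primitive w1 l hw1 wf hp (by omega) (some (zeroToks NS)) NS
  obtain ⟨p', hp'⟩ := parse_of_run h
  have ho := outputs_of_model stubS hmain μ hμ ub _ NS hlen fitsS hp' (fun h0 => absurd h0 (by decide))
  have he : encodeResult binS.cfg JSMN_ERROR_PART (zeroToks NS) = le32 JSMN_ERROR_PART := by
    unfold encodeResult
    rw [if_pos (by decide), List.append_nil]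
  rwa [he] at ho

end

end Runs
end J6
end X86

#print axioms X86.J6.Runs.valid_outputs_D
#print axioms X86.J6.Runs.always_outputs_D
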